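-- pv_equiv track=rewrite | github.com/postsi/ESPHomeToolkit | tests/conftest.py | _parse_local_http_result
-- ===== SOURCE A (Python) =====
-- def _parse_local_http_result(text: str) -> tuple[int | None, str | None]:
--     """Parse 'Status: 200\\nHeaders: ...\\nBody: {...}' into (status_code, body_str). Body may be multi-line."""
--     status = None
--     body = None
--     lines = text.split("\n")
--     for i, line in enumerate(lines):
--         if line.startswith("Status:"):
--             try:
--                 status = int(line.split(":", 1)[1].strip())
--             except (ValueError, IndexError):
--                 pass
--         elif line.startswith("Body:"):
--             first = line.split(":", 1)[1].lstrip() if ":" in line else ""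
--             rest = "\n".join(lines[i + 1 :]) if i + 1 < len(lines) else ""
--             body = (first + ("\n" + rest if rest else "")).strip()
--             break
--     return status, body
-- ===== SOURCE B (Python) =====
-- def _parse_local_http_result(text: str) -> tuple[int | None, str | None]:
--     """Index-first decomposition: locate the Body line once, scan the prefix backwards
--     for the last successfully-parsed Status, then rebuild the body from the slice."""
--     lines = text.split("\n")
--     body_idx = next((i for i, l in enumerate(lines) if l.startswith("Body:")), None)
--     scan = lines if body_idx is None else lines[:body_idx]
--     status = None
--     for line in reversed(scan):
--         if line.startswith("Status:"):
--             try: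
--                 status = int(line.split(":", 1)[1].strip())
--                 break
--             except ValueError:
--                 pass
--     if body_idx is None:
--         return status, None
--     first = lines[body_idx].split(":", 1)[1].lstrip()
--     tail = "\n".join(lines[body_idx + 1:])
--     return status, (first + "\n" + tail if tail else first).strip()
-- ===== Notes on version B (the rewrite author's own statement) =====
-- stated objective: alternative
-- what changed: Replaces A's single interleaved loop-with-break by an index-first decomposition: find the first 'Body:' line, scan only the prefix backwards for the first successfully parsed 'Status:' (equals A's last), then rebuild the body from the found index by slicing.
import Mathlib
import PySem

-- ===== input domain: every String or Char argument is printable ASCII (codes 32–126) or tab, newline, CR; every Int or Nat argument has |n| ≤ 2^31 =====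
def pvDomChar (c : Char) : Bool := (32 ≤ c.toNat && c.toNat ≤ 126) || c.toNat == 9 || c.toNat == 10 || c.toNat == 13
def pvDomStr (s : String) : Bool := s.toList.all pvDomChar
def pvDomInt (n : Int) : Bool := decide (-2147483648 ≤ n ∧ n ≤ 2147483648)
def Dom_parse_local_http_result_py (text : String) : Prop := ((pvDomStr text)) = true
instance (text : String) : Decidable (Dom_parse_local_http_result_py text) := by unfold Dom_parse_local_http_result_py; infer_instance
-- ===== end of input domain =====

-- B replaces A's single loop-with-break by an index-first decomposition (find the Body line,
-- backward status scan of the prefix, slice-based body rebuild); alternative, same cost.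

-- ===== PORT A =====
-- line.split(":", 1)[1] with try/except (ValueError, IndexError): on failure keep old status
def pvA_tryStatus (line : String) (status : Option Int) : Option Int :=
  -- splitMax? is some since ":" ≠ ""; pyGet? none = IndexError, caught by A's except
  match PySem.List.pyGet? ((PySem.Str.splitMax? line ":" 1).getD []) 1 with
  | none => status
  | some part =>
    match PySem.Int.ofStr? (PySem.Str.strip part) with
    | none => status        -- ValueError, caught
    | some n => some n

-- the for-loop over enumerate(lines): recursion carries the remaining tail = lines[i+1:]
def pvA_go (status : Option Int) : List String → Option Int × Option String
  | [] => (status, none)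
  | line :: rest =>
    if PySem.Str.startswith line "Status:" then
      pvA_go (pvA_tryStatus line status) rest
    else if PySem.Str.startswith line "Body:" then
      let first := if PySem.Str.isIn ":" line then
          -- ":" in line ⇒ split has a second part; getD "" is unreachable
          (PySem.List.pyGet? ((PySem.Str.splitMax? line ":" 1).getD []) 1).getD ""
        else ""
      let firstL := PySem.Str.lstrip first
      let restS := if rest.length > 0 then PySem.Str.join "\n" rest else ""
      (status, some (PySem.Str.strip (firstL ++ (if restS ≠ "" then "\n" ++ restS else ""))))
    else
      pvA_go status rest

def parse_local_http_result_py (text : String) : Option Int × Option String :=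
  pvA_go none ((PySem.Str.split? text "\n").getD [])   -- split? is some, sep ≠ ""

-- ===== PORT B =====
-- next((i for i, l in enumerate(lines) if l.startswith("Body:")), None)
def pvB_findBody : List String → Option Nat
  | [] => none
  | l :: ls =>
    if PySem.Str.startswith l "Body:" then some 0
    else (pvB_findBody ls).map (· + 1)

-- int(line.split(":", 1)[1].strip()); Source B indexes [1] outside the try — unreachable miss ported as getD ""
def pvB_parse (l : String) : Option Int :=
  PySem.Int.ofStr? (PySem.Str.strip
      ((PySem.List.pyGet? ((PySem.Str.splitMax? l ":" 1).getD []) 1).getD ""))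

-- for line in reversed(scan): first successful parse wins (break)
def pvB_firstStatus : List String → Option Int
  | [] => none
  | l :: ls =>
    if PySem.Str.startswith l "Status:" then
      match pvB_parse l with
      | some n => some n
      | none => pvB_firstStatus ls
    else pvB_firstStatus ls

def parse_local_http_result_py_alt (text : String) : Option Int × Option String :=
  let lines := (PySem.Str.split? text "\n").getD []    -- split? is some, sep ≠ ""
  let bi := pvB_findBody lines
  let scan := match bi with
    | none => lines
    | some i => PySem.List.slice lines none (some (i : Int))
  let status := pvB_firstStatus scan.reverse
  match bi with
  | none => (status, none)
  | some i =>
    let line := (PySem.List.pyGet? lines (i : Int)).getD ""   -- i < len lines, so some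
    let first := PySem.Str.lstrip
        ((PySem.List.pyGet? ((PySem.Str.splitMax? line ":" 1).getD []) 1).getD "")
    let tail := PySem.Str.join "\n" (PySem.List.slice lines (some ((i : Int) + 1)) none)
    (status, some (PySem.Str.strip (if tail ≠ "" then first ++ "\n" ++ tail else first)))

-- ===== PRECONDITION & SPEC =====
def Spec_parse_local_http_result_py (text : String) (out : Option Int × Option String) : Prop := out = parse_local_http_result_py_alt text
instance (text : String) (out : Option Int × Option String) : Decidable (Spec_parse_local_http_result_py text out) := by unfold Spec_parse_local_http_result_py; infer_instance

-- ===== CLAIM (what is proved, stated in full; the proofs are below) =====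
def Claim_equal_parse_local_http_result_py : Prop := ∀ (text : String), Dom_parse_local_http_result_py text → Spec_parse_local_http_result_py text (parse_local_http_result_py text)

-- ===== LEMMAS AND PROOFS =====

lemma pv_not_body_of_status (l : String) (h : PySem.Str.startswith l "Status:" = true) :
    PySem.Str.startswith l "Body:" = false := by
  by_contra hb
  rw [Bool.not_eq_false] at hb
  simp only [PySem.Str.startswith_eq] at h hb
  rw [PySem.Chars.startswith_iff] at h hb
  obtain ⟨t1, h1⟩ := h
  obtain ⟨t2, h2⟩ := hb
  rw [← h2] at h1
  simp at h1

lemma pv_colon_of_body (l : String) (h : PySem.Str.startswith l "Body:" = true) :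
    PySem.Str.isIn ":" l = true := by
  simp only [PySem.Str.startswith_eq] at h
  rw [PySem.Chars.startswith_iff] at h
  obtain ⟨t, ht⟩ := h
  have : (":" : String).toList <:+: l.toList := by
    refine ⟨['B','o','d','y'], t, ?_⟩
    simpa using ht
  simpa [PySem.Str.isIn_eq, PySem.Chars.isIn_iff_infix] using this

-- case-reduction lemmas for the recursive ports (via eq_def; plain equation unfolding
-- stalls on the PySem string primitives in scrutinee position)
lemma pvA_go_cons_status (status : Option Int) (l : String) (ls : List String)
    (h : PySem.Str.startswith l "Status:" = true) :
    pvA_go status (l :: ls) = pvA_go (pvA_tryStatus l status) ls := by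
  rw [pvA_go.eq_def]; simp only [h, if_true]

lemma pvA_go_cons_other (status : Option Int) (l : String) (ls : List String)
    (hs : PySem.Str.startswith l "Status:" = false)
    (hb : PySem.Str.startswith l "Body:" = false) :
    pvA_go status (l :: ls) = pvA_go status ls := by
  rw [pvA_go.eq_def]; simp only [hs, hb, Bool.false_eq_true, if_false]

lemma pvA_go_cons_body (status : Option Int) (l : String) (ls : List String)
    (hs : PySem.Str.startswith l "Status:" = false)
    (hb : PySem.Str.startswith l "Body:" = true) :
    pvA_go status (l :: ls) =
      (status, some (PySem.Str.strip
        ((PySem.Str.lstrip (if PySem.Str.isIn ":" l then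
            (PySem.List.pyGet? ((PySem.Str.splitMax? l ":" 1).getD []) 1).getD "" else "")) ++
         (if (if ls.length > 0 then PySem.Str.join "\n" ls else "") ≠ "" then
            "\n" ++ (if ls.length > 0 then PySem.Str.join "\n" ls else "") else "")))) := by
  rw [pvA_go.eq_def]; simp only [hs, hb, Bool.false_eq_true, if_false, if_true]

lemma pvB_findBody_cons_true (l : String) (ls : List String)
    (hb : PySem.Str.startswith l "Body:" = true) :
    pvB_findBody (l :: ls) = some 0 := by
  rw [pvB_findBody.eq_def]; simp only [hb, if_true]

lemma pvB_findBody_cons_false (l : String) (ls : List String)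
    (hb : PySem.Str.startswith l "Body:" = false) :
    pvB_findBody (l :: ls) = (pvB_findBody ls).map (· + 1) := by
  rw [pvB_findBody.eq_def]; simp only [hb, Bool.false_eq_true, if_false]

lemma pvB_firstStatus_cons_false (l : String) (ls : List String)
    (h : PySem.Str.startswith l "Status:" = false) :
    pvB_firstStatus (l :: ls) = pvB_firstStatus ls := by
  rw [pvB_firstStatus.eq_def]; simp only [h, Bool.false_eq_true, if_false]

lemma pvB_firstStatus_cons_true (l : String) (ls : List String)
    (h : PySem.Str.startswith l "Status:" = true) :
    pvB_firstStatus (l :: ls) =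
      match pvB_parse l with
      | some n => some n
      | none => pvB_firstStatus ls := by
  rw [pvB_firstStatus.eq_def]; simp only [h, if_true]

def pvPick (o : Option Int) (status : Option Int) : Option Int :=
  match o with
  | some n => some n
  | none => status

lemma pvB_firstStatus_append (xs ys : List String) :
    pvB_firstStatus (xs ++ ys) = pvPick (pvB_firstStatus xs) (pvB_firstStatus ys) := by
  induction xs with
  | nil => rfl
  | cons l ls ih =>
    rw [List.cons_append]
    by_cases h : PySem.Str.startswith l "Status:" = true
    · rw [pvB_firstStatus_cons_true _ _ h, pvB_firstStatus_cons_true _ _ h]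
      cases pvB_parse l <;> simp [pvPick, ih]
    · rw [Bool.not_eq_true] at h
      rw [pvB_firstStatus_cons_false _ _ h, pvB_firstStatus_cons_false _ _ h, ih]

lemma pv_status_step (l : String) (xs : List String) (status : Option Int)
    (h : PySem.Str.startswith l "Status:" = true) :
    pvPick (pvB_firstStatus (xs ++ [l])) status
      = pvPick (pvB_firstStatus xs) (pvA_tryStatus l status) := by
  rw [pvB_firstStatus_append]
  have hsing : pvPick (pvB_firstStatus [l]) status = pvA_tryStatus l status := by
    rw [pvB_firstStatus_cons_true _ _ h]
    unfold pvA_tryStatus pvB_parse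
    cases hg : PySem.List.pyGet? ((PySem.Str.splitMax? l ":" 1).getD []) 1 with
    | none =>
      have he : PySem.Int.ofStr? (PySem.Str.strip "") = none := rfl
      simp only [Option.getD_none, he]
      rfl
    | some p =>
      simp only [Option.getD_some]
      cases PySem.Int.ofStr? (PySem.Str.strip p) <;> rfl
  cases hfx : pvB_firstStatus xs with
  | some n => simp [pvPick]
  | none => simpa [pvPick] using hsing

-- the main loop correspondence
lemma pv_main (lines : List String) : ∀ (status : Option Int),
    pvA_go status lines =
      match pvB_findBody lines with
      | none => (pvPick (pvB_firstStatus lines.reverse) status, none)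
      | some i =>
          (pvPick (pvB_firstStatus (lines.take i).reverse) status,
           some (PySem.Str.strip
             (let first := PySem.Str.lstrip
                 ((PySem.List.pyGet?
                     ((PySem.Str.splitMax? (((PySem.List.pyGet? lines (i : Int)).getD "")) ":" 1).getD []) 1).getD "")
              let tail := PySem.Str.join "\n" (lines.drop (i + 1))
              if tail ≠ "" then first ++ "\n" ++ tail else first))) := by
  induction lines with
  | nil => intro status; rfl
  | cons l ls ih =>
    intro status
    by_cases hs : PySem.Str.startswith l "Status:" = true
    · have hb := pv_not_body_of_status l hs
      rw [pvA_go_cons_status _ _ _ hs, ih, pvB_findBody_cons_false _ _ hb]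
      cases hf : pvB_findBody ls with
      | none =>
        simp only [Option.map_none, List.reverse_cons]
        rw [pv_status_step _ _ _ hs]
      | some i =>
        simp only [Option.map_some, List.take_succ_cons, List.reverse_cons]
        rw [pv_status_step _ _ _ hs]
        refine congrArg (fun b => (_, some (PySem.Str.strip b))) ?_
        have hg : PySem.List.pyGet? (l :: ls) (((i : Int)) + 1) = PySem.List.pyGet? ls (i : Int) :=
          PySem.List.pyGet?_cons_succ ..
        push_cast
        rw [hg]
        rfl
    · rw [Bool.not_eq_true] at hs
      by_cases hb : PySem.Str.startswith l "Body:" = true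
      · rw [pvA_go_cons_body _ _ _ hs hb, pvB_findBody_cons_true _ _ hb]
        simp only [List.take_zero, List.reverse_nil]
        refine congrArg (fun b => (status, some (PySem.Str.strip b))) ?_
        have hcol := pv_colon_of_body l hb
        have hget : PySem.List.pyGet? (l :: ls) ((0 : Nat) : Int) = some l :=
          PySem.List.pyGet?_zero_cons ..
        simp only [hcol, if_true, hget, Option.getD_some, List.drop_succ_cons, List.drop_zero]
        by_cases hrest : ls = []
        · subst hrest
          have hj : PySem.Str.join "\n" ([] : List String) = "" := rfl
          simp [hj]
        · have hlen : ls.length > 0 := List.length_pos_iff.mpr hrest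
          rw [if_pos hlen]
          by_cases hjoin : PySem.Str.join "\n" ls = ""
          · simp [hjoin]
          · simp only [ne_eq, hjoin, not_false_iff, if_pos]
            rw [String.append_assoc]
      · rw [Bool.not_eq_true] at hb
        rw [pvA_go_cons_other _ _ _ hs hb, ih, pvB_findBody_cons_false _ _ hb]
        cases hf : pvB_findBody ls with
        | none =>
          simp only [Option.map_none, List.reverse_cons, pvB_firstStatus_append]
          rw [pvB_firstStatus_cons_false _ _ hs]
          cases pvB_firstStatus ls.reverse <;> rfl
        | some i =>
          simp only [Option.map_some, List.take_succ_cons, List.reverse_cons,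
            pvB_firstStatus_append]
          rw [pvB_firstStatus_cons_false _ _ hs]
          rw [Prod.mk.injEq]
          refine ⟨?_, ?_⟩
          · cases pvB_firstStatus (ls.take i).reverse <;> rfl
          · refine congrArg (fun b => some (PySem.Str.strip b)) ?_
            push_cast
            rw [PySem.List.pyGet?_cons_succ]
            rfl

-- ===== VERDICT (by name: the statement is the Claim_ definition above) =====
theorem parse_local_http_result_py_spec : Claim_equal_parse_local_http_result_py := by
  intro text _
  unfold Spec_parse_local_http_result_py parse_local_http_result_py parse_local_http_result_py_alt
  rw [pv_main]
  have hsl : ∀ i : Nat, PySem.List.slice ((PySem.Str.split? text "\n").getD []) none (some (i : Int))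
      = ((PySem.Str.split? text "\n").getD []).take i := fun i => PySem.List.slice_to_natCast _ _
  have hdr : ∀ i : Nat, PySem.List.slice ((PySem.Str.split? text "\n").getD []) (some ((i : Int) + 1)) none
      = ((PySem.Str.split? text "\n").getD []).drop (i + 1) := by
    intro i
    have h1 : ((i : Int) + 1) = ((i + 1 : Nat) : Int) := by push_cast; ring
    rw [h1, PySem.List.slice_from_natCast]
  cases hf : pvB_findBody ((PySem.Str.split? text "\n").getD []) with
  | none =>
    simp only [hf]
    cases pvB_firstStatus ((PySem.Str.split? text "\n").getD []).reverse <;> rfl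
  | some i =>
    simp only [hf, hsl i, hdr i]
    cases pvB_firstStatus (((PySem.Str.split? text "\n").getD []).take i).reverse <;> rfl
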